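-- pv_equiv track=rewrite | github.com/kanchang12/melodicamate | services/music_mapping.py | map_notes_to_numbers
-- ===== SOURCE A (Python) =====
-- from typing import Dict, List, Optional
--
-- PITCH_CLASSES = ["C", "C#", "D", "D#", "E", "F", "F#", "G", "G#", "A", "A#", "B"]
--
-- def degree_token_for_midi(
--     midi: int,
--     key_tonic: str = "C",
--     mode: str = "major",
--     accidental_pref: str = "sharps",
-- ) -> str:
--     tonic_pc = _pitch_class_index(key_tonic)
--     if tonic_pc is None:
--         tonic_pc = 0
--     pitch_class = midi % 12
--     scale = _scale_intervals(mode)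
--     degrees = [(tonic_pc + interval) % 12 for interval in scale]
--     if pitch_class in degrees:
--         degree_idx = degrees.index(pitch_class) + 1
--         return str(degree_idx)
--     # accidental
--     closest = min(
--         degrees, key=lambda d: min((pitch_class - d) % 12, (d - pitch_class) % 12)
--     )
--     degree_idx = degrees.index(closest) + 1
--     diff = (pitch_class - closest) % 12
--     if diff == 1:
--         prefix = "#"
--     elif diff == 11:  # -1 mod 12
--         prefix = "b"
--     else:
--         prefix = "#" if accidental_pref == "sharps" else "b"
--     return f"{prefix}{degree_idx}"
--
-- def map_notes_to_numbers(
--     notes: List[Dict], key_tonic: str, mode: str = "major", acc_pref: str = "sharps"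
-- ) -> List[str]:
--     numbers: List[str] = []
--     for n in notes:
--         midi = n.get("midi")
--         if midi is None:
--             continue
--         numbers.append(degree_token_for_midi(int(midi), key_tonic, mode, acc_pref))
--     return numbers
--
-- def _pitch_class_index(name: str) -> Optional[int]:
--     name = (name or "").strip().upper()
--     aliases = {"DB": "C#", "EB": "D#", "GB": "F#", "AB": "G#", "BB": "A#"}
--     name = aliases.get(name, name)
--     try:
--         return PITCH_CLASSES.index(name)
--     except ValueError:
--         return None
--
-- def _scale_intervals(mode: str) -> List[int]:
--     mode = (mode or "major").lower()
--     if mode == "minor":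
--         return [0, 2, 3, 5, 7, 8, 10]
--     return [0, 2, 4, 5, 7, 9, 11]
-- ===== SOURCE B (Python) =====
-- from typing import Dict, List
--
-- PITCH_CLASSES = ["C", "C#", "D", "D#", "E", "F", "F#", "G", "G#", "A", "A#", "B"]
--
-- _ALIASES = {"DB": "C#", "EB": "D#", "GB": "F#", "AB": "G#", "BB": "A#"}
--
--
-- def map_notes_to_numbers(
--     notes: List[Dict], key_tonic: str, mode: str = "major", acc_pref: str = "sharps"
-- ) -> List[str]:
--     # Compute the constants once, then build a 12-entry pitch-class -> token table.
--     name = (key_tonic or "").strip().upper()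
--     name = _ALIASES.get(name, name)
--     tonic_pc = PITCH_CLASSES.index(name) if name in PITCH_CLASSES else 0
--     m = (mode or "major").lower()
--     scale = [0, 2, 3, 5, 7, 8, 10] if m == "minor" else [0, 2, 4, 5, 7, 9, 11]
--     degrees = [(tonic_pc + iv) % 12 for iv in scale]
--     tok = []
--     for pc in range(12):
--         if pc in degrees:
--             tok.append(str(degrees.index(pc) + 1))
--         else:
--             closest = min(
--                 degrees, key=lambda d: min((pc - d) % 12, (d - pc) % 12)
--             )
--             idx = degrees.index(closest) + 1
--             diff = (pc - closest) % 12
--             if diff == 1: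
--                 prefix = "#"
--             elif diff == 11:
--                 prefix = "b"
--             else:
--                 prefix = "#" if acc_pref == "sharps" else "b"
--             tok.append(prefix + str(idx))
--     return [tok[int(n["midi"]) % 12] for n in notes if n.get("midi") is not None]
-- ===== Notes on version B (the rewrite author's own statement) =====
-- stated objective: alternative
-- what changed: B computes the tonic/scale/degrees constants once and builds a 12-entry pitch-class-to-token lookup table, then maps each note by a table index, instead of A's per-note recomputation of the tonic parse, scale, degrees and closest-degree scan.
import Mathlib
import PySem

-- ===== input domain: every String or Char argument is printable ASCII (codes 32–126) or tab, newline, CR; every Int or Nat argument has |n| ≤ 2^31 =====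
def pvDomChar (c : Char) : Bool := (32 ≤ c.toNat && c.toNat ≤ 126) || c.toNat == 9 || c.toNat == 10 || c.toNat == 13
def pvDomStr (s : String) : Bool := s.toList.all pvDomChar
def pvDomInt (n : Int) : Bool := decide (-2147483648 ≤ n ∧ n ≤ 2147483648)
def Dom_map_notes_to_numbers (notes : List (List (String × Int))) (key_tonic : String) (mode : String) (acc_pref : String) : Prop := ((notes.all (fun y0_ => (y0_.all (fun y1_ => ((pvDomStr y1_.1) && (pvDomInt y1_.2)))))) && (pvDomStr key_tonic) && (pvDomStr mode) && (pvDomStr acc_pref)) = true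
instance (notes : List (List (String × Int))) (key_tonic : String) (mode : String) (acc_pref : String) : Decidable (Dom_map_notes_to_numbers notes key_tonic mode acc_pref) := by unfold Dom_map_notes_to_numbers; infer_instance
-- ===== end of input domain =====

-- B builds the tonic/scale/degrees constants and a 12-entry pitch-class → token table once,
-- then maps each note by a table lookup, instead of A's per-note recomputation (alternative).

-- ===== PORT A =====

def pvPitchClasses : List String :=
  ["C", "C#", "D", "D#", "E", "F", "F#", "G", "G#", "A", "A#", "B"]

def pvAliases : PySem.Dict String String :=
  PySem.Dict.ofList [("DB", "C#"), ("EB", "D#"), ("GB", "F#"), ("AB", "G#"), ("BB", "A#")]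

-- name = (name or "").strip().upper(); name = aliases.get(name, name)
def pvNormName (s : String) : String :=
  let name := PySem.Str.upper (PySem.Str.strip (if s = "" then "" else s))
  pvAliases.getD name name

def pv_pitch_class_index (name : String) : Option Int :=
  match PySem.List.index? pvPitchClasses (pvNormName name) with
  | some i => some ((i : Nat) : Int)
  | none => none

def pv_scale_intervals (mode : String) : List Int :=
  let mode := PySem.Str.lower (if mode = "" then "major" else mode)
  if mode = "minor" then [0, 2, 3, 5, 7, 8, 10] else [0, 2, 4, 5, 7, 9, 11]

def degree_token_for_midi (midi : Int) (key_tonic : String) (mode : String)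
    (accidental_pref : String) : String :=
  let tonic_pc : Int := (pv_pitch_class_index key_tonic).getD 0
  let pitch_class : Int := PySem.Int.mod midi 12
  let scale := pv_scale_intervals mode
  let degrees := scale.map (fun interval => PySem.Int.mod (tonic_pc + interval) 12)
  if pitch_class ∈ degrees then
    PySem.Int.toStr ((((PySem.List.index? degrees pitch_class).getD 0 : Nat) : Int) + 1)
  else
    let closest := (PySem.List.min? degrees
      (fun d => min (PySem.Int.mod (pitch_class - d) 12) (PySem.Int.mod (d - pitch_class) 12))).getD 0
    let degree_idx : Int := (((PySem.List.index? degrees closest).getD 0 : Nat) : Int) + 1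
    let diff := PySem.Int.mod (pitch_class - closest) 12
    let pre : String :=
      if diff = 1 then "#"
      else if diff = 11 then "b"
      else if accidental_pref = "sharps" then "#" else "b"
    pre ++ PySem.Int.toStr degree_idx

def map_notes_to_numbers (notes : List (List (String × Int))) (key_tonic : String)
    (mode : String) (acc_pref : String) : List String :=
  notes.foldl (fun numbers n =>
    match (PySem.Dict.mk n).get? "midi" with
    | none => numbers
    | some midi => numbers ++ [degree_token_for_midi midi key_tonic mode acc_pref]) []

-- ===== PORT B =====

def map_notes_to_numbers_alt (notes : List (List (String × Int))) (key_tonic : String)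
    (mode : String) (acc_pref : String) : List String :=
  let name := pvNormName key_tonic
  let tonic_pc : Int :=
    if name ∈ pvPitchClasses then (((PySem.List.index? pvPitchClasses name).getD 0 : Nat) : Int)
    else 0
  let m := PySem.Str.lower (if mode = "" then "major" else mode)
  let scale : List Int := if m = "minor" then [0, 2, 3, 5, 7, 8, 10] else [0, 2, 4, 5, 7, 9, 11]
  let degrees := scale.map (fun iv => PySem.Int.mod (tonic_pc + iv) 12)
  let tok : List String := (PySem.List.pyRange 0 12 1).map (fun pc =>
    if pc ∈ degrees then
      PySem.Int.toStr ((((PySem.List.index? degrees pc).getD 0 : Nat) : Int) + 1)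
    else
      let closest := (PySem.List.min? degrees
        (fun d => min (PySem.Int.mod (pc - d) 12) (PySem.Int.mod (d - pc) 12))).getD 0
      let idx : Int := (((PySem.List.index? degrees closest).getD 0 : Nat) : Int) + 1
      let diff := PySem.Int.mod (pc - closest) 12
      let pre : String :=
        if diff = 1 then "#"
        else if diff = 11 then "b"
        else if acc_pref = "sharps" then "#" else "b"
      pre ++ PySem.Int.toStr idx)
  notes.filterMap (fun n =>
    match (PySem.Dict.mk n).get? "midi" with
    | none => none
    | some midi => some ((PySem.List.pyGet? tok (PySem.Int.mod midi 12)).getD ""))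

-- ===== PRECONDITION & SPEC =====
def Spec_map_notes_to_numbers (notes : List (List (String × Int))) (key_tonic : String) (mode : String) (acc_pref : String) (out : List String) : Prop := out = map_notes_to_numbers_alt notes key_tonic mode acc_pref
instance (notes : List (List (String × Int))) (key_tonic : String) (mode : String) (acc_pref : String) (out : List String) : Decidable (Spec_map_notes_to_numbers notes key_tonic mode acc_pref out) := by unfold Spec_map_notes_to_numbers; infer_instance

-- ===== CLAIM (what is proved, stated in full; the proofs are below) =====
def Claim_equal_map_notes_to_numbers : Prop := ∀ (notes : List (List (String × Int))) (key_tonic : String) (mode : String) (acc_pref : String), Dom_map_notes_to_numbers notes key_tonic mode acc_pref → Spec_map_notes_to_numbers notes key_tonic mode acc_pref (map_notes_to_numbers notes key_tonic mode acc_pref)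

-- ===== LEMMAS AND PROOFS =====

-- proof-side names for the constants B binds with `let` (definitionally those lets)
def pvTonic (key_tonic : String) : Int :=
  if pvNormName key_tonic ∈ pvPitchClasses then
    (((PySem.List.index? pvPitchClasses (pvNormName key_tonic)).getD 0 : Nat) : Int)
  else 0

def pvDegrees (key_tonic mode : String) : List Int :=
  let m := PySem.Str.lower (if mode = "" then "major" else mode)
  let scale : List Int := if m = "minor" then [0, 2, 3, 5, 7, 8, 10] else [0, 2, 4, 5, 7, 9, 11]
  scale.map (fun iv => PySem.Int.mod (pvTonic key_tonic + iv) 12)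

def pvTokF (key_tonic mode acc_pref : String) : Int → String := fun pc =>
  let degrees := pvDegrees key_tonic mode
  if pc ∈ degrees then
    PySem.Int.toStr ((((PySem.List.index? degrees pc).getD 0 : Nat) : Int) + 1)
  else
    let closest := (PySem.List.min? degrees
      (fun d => min (PySem.Int.mod (pc - d) 12) (PySem.Int.mod (d - pc) 12))).getD 0
    let idx : Int := (((PySem.List.index? degrees closest).getD 0 : Nat) : Int) + 1
    let diff := PySem.Int.mod (pc - closest) 12
    let pre : String :=
      if diff = 1 then "#"
      else if diff = 11 then "b"
      else if acc_pref = "sharps" then "#" else "b"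
    pre ++ PySem.Int.toStr idx

def pvTok (key_tonic mode acc_pref : String) : List String :=
  (PySem.List.pyRange 0 12 1).map (pvTokF key_tonic mode acc_pref)

theorem pv_alt_eq (notes : List (List (String × Int))) (key_tonic mode acc_pref : String) :
    map_notes_to_numbers_alt notes key_tonic mode acc_pref =
      notes.filterMap (fun n =>
        match (PySem.Dict.mk n).get? "midi" with
        | none => none
        | some midi =>
            some ((PySem.List.pyGet? (pvTok key_tonic mode acc_pref)
              (PySem.Int.mod midi 12)).getD "")) := rfl

-- A's tonic (Optional index defaulted to 0) equals B's membership-guarded index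
theorem pv_tonic_eq (key_tonic : String) :
    (pv_pitch_class_index key_tonic).getD 0 = pvTonic key_tonic := by
  unfold pv_pitch_class_index pvTonic
  generalize pvNormName key_tonic = nm
  rcases h : PySem.List.index? pvPitchClasses nm with _ | i
  · rw [if_neg ((PySem.List.index?_eq_none_iff _ _).mp h)]
    simp
  · have hmem : nm ∈ pvPitchClasses := by
      by_contra hn
      rw [(PySem.List.index?_eq_none_iff _ _).mpr hn] at h
      cases h
    rw [if_pos hmem]
    simp

-- A's per-note token is B's table-building function applied at midi % 12
theorem pv_token_eq (midi : Int) (key_tonic mode acc_pref : String) :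
    degree_token_for_midi midi key_tonic mode acc_pref =
      pvTokF key_tonic mode acc_pref (PySem.Int.mod midi 12) := by
  simp only [degree_token_for_midi, pvTokF, pvDegrees, pv_scale_intervals, pv_tonic_eq]
  rfl

-- the 12-entry table built over pyRange 0 12 1, read at an index in [0, 12)
theorem pv_table_get (f : Int → String) (i : Int) (h0 : 0 ≤ i) (h1 : i < 12) :
    (PySem.List.pyGet? ((PySem.List.pyRange 0 12 1).map f) i).getD "" = f i := by
  have hr : PySem.List.pyRange 0 12 1 = [0, 1, 2, 3, 4, 5, 6, 7, 8, 9, 10, 11] := by decide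
  rw [hr]
  interval_cases i <;> simp [PySem.List.pyGet?, PySem.List.pyIdx?]

-- A's accumulator loop with a skip is the filterMap of the pointwise-equal function
theorem pv_foldl_filterMap (fA fB : Int → String) (hf : ∀ midi, fA midi = fB midi)
    (l : List (List (String × Int))) (acc : List String) :
    l.foldl (fun numbers n =>
        match (PySem.Dict.mk n).get? "midi" with
        | none => numbers
        | some midi => numbers ++ [fA midi]) acc
      = acc ++ l.filterMap (fun n =>
        match (PySem.Dict.mk n).get? "midi" with
        | none => none
        | some midi => some (fB midi)) := by
  induction l generalizing acc with
  | nil => simp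
  | cons n t ih =>
      rcases h : (PySem.Dict.mk n).get? "midi" with _ | midi
      · simpa [h] using ih acc
      · simp only [List.foldl_cons, List.filterMap_cons, h]
        rw [ih, hf]
        simp

-- ===== VERDICT (by name: the statement is the Claim_ definition above) =====
theorem map_notes_to_numbers_spec : Claim_equal_map_notes_to_numbers := by
  intro notes key_tonic mode acc_pref _
  show map_notes_to_numbers notes key_tonic mode acc_pref =
    map_notes_to_numbers_alt notes key_tonic mode acc_pref
  rw [pv_alt_eq, map_notes_to_numbers]
  refine (pv_foldl_filterMap
    (fun midi => degree_token_for_midi midi key_tonic mode acc_pref)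
    (fun midi => (PySem.List.pyGet? (pvTok key_tonic mode acc_pref)
      (PySem.Int.mod midi 12)).getD "")
    (fun midi => ?_) notes []).trans (List.nil_append _)
  show degree_token_for_midi midi key_tonic mode acc_pref =
    (PySem.List.pyGet? (pvTok key_tonic mode acc_pref) (PySem.Int.mod midi 12)).getD ""
  rw [pv_token_eq]
  exact (pv_table_get (pvTokF key_tonic mode acc_pref) (PySem.Int.mod midi 12)
    (PySem.Int.mod_nonneg midi (by norm_num)) (PySem.Int.mod_lt midi (by norm_num))).symm
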